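-- pv_equiv track=rewrite | github.com/RJdeck/slots-extractor | bands/422/preprocess.py | get_random_item
-- ===== SOURCE A (Python) =====
-- def get_random_item(column_data, icon):
--     icon_count = 0
--     for row in column_data:
--         for index in range(len(row)):
--             if index == 0 or index == 4:
--                 continue
--             if row[index] == icon:
--                 icon_count += 1
--     return icon_count
-- ===== SOURCE B (Python) =====
-- def get_random_item(column_data, icon):
--     total = 0
--     for row in column_data:
--         c = row.count(icon)
--         if len(row) > 0 and row[0] == icon:
--             c -= 1
--         if len(row) > 4 and row[4] == icon:
--             c -= 1
--         total += c
--     return total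
-- ===== Notes on version B (the rewrite author's own statement) =====
-- stated objective: faster
-- what changed: Replaces the per-index Python loop with a skip test by a whole-row list.count plus at most two O(1) corrections for the excluded positions 0 and 4.
import Mathlib
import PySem

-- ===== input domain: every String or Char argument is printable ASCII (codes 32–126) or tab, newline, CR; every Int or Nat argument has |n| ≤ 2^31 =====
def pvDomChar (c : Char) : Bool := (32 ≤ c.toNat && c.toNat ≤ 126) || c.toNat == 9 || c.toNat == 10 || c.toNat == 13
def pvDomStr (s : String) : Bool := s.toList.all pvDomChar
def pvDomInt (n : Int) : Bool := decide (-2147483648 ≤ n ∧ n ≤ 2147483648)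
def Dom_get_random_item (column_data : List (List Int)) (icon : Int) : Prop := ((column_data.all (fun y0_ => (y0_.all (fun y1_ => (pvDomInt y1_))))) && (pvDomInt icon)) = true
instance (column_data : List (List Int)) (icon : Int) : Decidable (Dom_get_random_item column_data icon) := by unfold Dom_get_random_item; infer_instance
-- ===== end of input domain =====

-- B replaces A's per-index skip-loop by a whole-row count with O(1) corrections at positions 0 and 4 (constant-factor speedup).


-- ===== PORT A =====
def get_random_item (column_data : List (List Int)) (icon : Int) : Int :=
  column_data.foldl (fun icon_count row =>
    (PySem.List.pyRange 0 (row.length : Int)).foldl (fun c index =>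
      if index = 0 ∨ index = 4 then c
      else if PySem.List.pyGetD row index 0 = icon then c + 1 else c) icon_count) 0

-- ===== PORT B =====
def get_random_item_alt (column_data : List (List Int)) (icon : Int) : Int :=
  column_data.foldl (fun total row =>
    let c : Int := (PySem.List.count row icon : Int)
    let c := if 0 < row.length ∧ PySem.List.pyGetD row 0 0 = icon then c - 1 else c
    let c := if 4 < row.length ∧ PySem.List.pyGetD row 4 0 = icon then c - 1 else c
    total + c) 0

-- ===== PRECONDITION & SPEC =====
def Spec_get_random_item (column_data : List (List Int)) (icon : Int) (out : Int) : Prop := out = get_random_item_alt column_data icon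
instance (column_data : List (List Int)) (icon : Int) (out : Int) : Decidable (Spec_get_random_item column_data icon out) := by unfold Spec_get_random_item; infer_instance

-- ===== CLAIM (what is proved, stated in full; the proofs are below) =====
def Claim_equal_get_random_item : Prop := ∀ (column_data : List (List Int)) (icon : Int), Dom_get_random_item column_data icon → Spec_get_random_item column_data icon (get_random_item column_data icon)

-- ===== LEMMAS AND PROOFS =====

-- the value A's inner loop adds for one row, as a Nat count over the index range
def pvRestr (row : List Int) (icon : Int) (k : Nat) : Bool :=
  decide (k ≠ 0) && decide (k ≠ 4) && decide (row.getD k 0 = icon)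

lemma innerA_eq (row : List Int) (icon : Int) (acc : Int) :
    (PySem.List.pyRange 0 (row.length : Int)).foldl (fun c index =>
      if index = 0 ∨ index = 4 then c
      else if PySem.List.pyGetD row index 0 = icon then c + 1 else c) acc
    = acc + ((List.range row.length).countP (pvRestr row icon) : Int) := by
  rw [PySem.List.pyRange_zero_natCast, List.foldl_map]
  have hstep : (fun (c : Int) (k : Nat) =>
      if ((k : Int) = 0 ∨ (k : Int) = 4) then c
      else if PySem.List.pyGetD row (k : Int) 0 = icon then c + 1 else c)
      = fun (c : Int) (k : Nat) => if pvRestr row icon k then c + 1 else c := by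
    funext c k
    simp only [PySem.List.pyGetD_natCast, pvRestr]
    split_ifs with h1 h2 h3 h4 h5 <;> simp_all <;> omega
  rw [hstep, PySem.List.foldl_count_if]

-- the full per-index count equals list.count
lemma count_eq_countP_range (row : List Int) (icon : Int) :
    (List.range row.length).countP (fun k => decide (row.getD k 0 = icon)) = row.count icon := by
  induction row with
  | nil => simp
  | cons x xs ih =>
    rw [List.length_cons, List.range_succ_eq_map, List.countP_cons, List.countP_map]
    simp only [List.getD_cons_zero, List.getD_cons_succ, Function.comp_def]
    rw [List.count_cons, ih]
    by_cases h : x = icon <;> simp [h, beq_iff_eq]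

-- splitting off the excluded indices 0 and 4
lemma countP_restr_split (row : List Int) (icon : Int) :
    ∀ n : Nat, ((List.range n).countP (fun k => decide (row.getD k 0 = icon)) : Int)
      = ((List.range n).countP (pvRestr row icon) : Int)
        + (if 0 < n ∧ row.getD 0 0 = icon then 1 else 0)
        + (if 4 < n ∧ row.getD 4 0 = icon then 1 else 0) := by
  intro n
  induction n with
  | zero => simp
  | succ m ih =>
    rw [List.range_succ, List.countP_append, List.countP_append]
    push_cast
    rw [ih]
    simp only [List.countP_singleton, pvRestr]
    rcases Nat.lt_or_ge m 5 with hm | hm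
    · interval_cases m <;>
        (by_cases h0 : row.getD 0 0 = icon <;> by_cases h4 : row.getD 4 0 = icon <;>
          simp <;> omega)
    · have hm0 : m ≠ 0 := by omega
      have hm4 : m ≠ 4 := by omega
      have e0 : (0 < m + 1 ∧ row.getD 0 0 = icon) ↔ (0 < m ∧ row.getD 0 0 = icon) :=
        ⟨fun ⟨_, h⟩ => ⟨by omega, h⟩, fun ⟨_, h⟩ => ⟨by omega, h⟩⟩
      have e4 : (4 < m + 1 ∧ row.getD 4 0 = icon) ↔ (4 < m ∧ row.getD 4 0 = icon) :=
        ⟨fun ⟨_, h⟩ => ⟨by omega, h⟩, fun ⟨_, h⟩ => ⟨by omega, h⟩⟩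
      by_cases hmv : row.getD m 0 = icon <;> simp only [e0, e4] <;>
        simp [hm0, hm4] <;> split_ifs <;> omega

-- B's per-row value equals A's per-row count
lemma row_value_eq (row : List Int) (icon : Int) :
    ((List.range row.length).countP (pvRestr row icon) : Int)
    = (let c : Int := (PySem.List.count row icon : Int)
       let c := if 0 < row.length ∧ PySem.List.pyGetD row 0 0 = icon then c - 1 else c
       if 4 < row.length ∧ PySem.List.pyGetD row 4 0 = icon then c - 1 else c) := by
  have h0 : PySem.List.pyGetD row 0 0 = row.getD 0 0 := by
    simpa using PySem.List.pyGetD_natCast row 0 0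
  have h4 : PySem.List.pyGetD row 4 0 = row.getD 4 0 := by
    simpa using PySem.List.pyGetD_natCast row 4 0
  have hc : (PySem.List.count row icon : Int) = (row.count icon : Int) := by
    simp [PySem.List.count]
  have hs := countP_restr_split row icon row.length
  rw [count_eq_countP_range] at hs
  simp only [h0, h4, hc]
  split_ifs at hs ⊢ <;> omega

theorem get_random_item_eq_alt (column_data : List (List Int)) (icon : Int) :
    get_random_item column_data icon = get_random_item_alt column_data icon := by
  unfold get_random_item get_random_item_alt
  induction column_data using List.reverseRecOn with
  | nil => rfl
  | append_singleton cd row ih =>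
    rw [List.foldl_append, List.foldl_append, List.foldl_cons, List.foldl_cons,
      List.foldl_nil, List.foldl_nil, ih, innerA_eq, row_value_eq]

-- ===== VERDICT (by name: the statement is the Claim_ definition above) =====
theorem get_random_item_spec : Claim_equal_get_random_item := by
  intro cd icon _
  unfold Spec_get_random_item
  exact get_random_item_eq_alt cd icon
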